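-- pv_equiv track=rewrite | github.com/denghuacc/my-algorithms | leetcode/string/1410.html-实体解析器.py | entityParser
-- ===== SOURCE A (Python) =====
-- from operator import contains
--
-- def entityParser(text: str) -> str:
--     map = {
--         '&quot;': '"',
--         '&apos;': "'",
--         '&amp;': '&',
--         '&gt;': '>',
--         '&lt;': '<',
--         '&frasl;': '/',
--     }
--     i, n = 0, len(text)
--     res = ""
--     while i < n:
--         if text[i] == "&":
--             i += 1
--             symbol = "&"
--             while i < n and text[i] != "&" and text[i] != ";":
--                 symbol += text[i]
--                 i += 1
--             if i < n and text[i] == ';':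
--                 symbol += ';'
--                 i += 1
--             if contains(map, symbol):
--                 res += map[symbol]
--             else:
--                 res += symbol
--         else:
--             res += text[i]
--             i += 1
--     return res
-- ===== SOURCE B (Python) =====
-- def entityParser(text: str) -> str:
--     entities = [
--         ('&quot;', '"'),
--         ('&apos;', "'"),
--         ('&amp;', '&'),
--         ('&gt;', '>'),
--         ('&lt;', '<'),
--         ('&frasl;', '/'),
--     ]
--     out = []
--     i = 0
--     n = len(text)
--     while i < n:
--         for key, val in entities:
--             if text.startswith(key, i):
--                 out.append(val)
--                 i += len(key)
--                 break
--         else: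
--             out.append(text[i])
--             i += 1
--     return ''.join(out)
-- ===== Notes on version B (the rewrite author's own statement) =====
-- stated objective: simpler
-- what changed: A walks the string building an entity symbol for every ampersand-run (scan to the next delimiter, then a dict lookup) and grows the result by repeated string concatenation; B instead matches the six literal entity strings directly as prefixes at each position (first match wins), appending pieces to a list joined once, with no symbol building and no dict.
import Mathlib
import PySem

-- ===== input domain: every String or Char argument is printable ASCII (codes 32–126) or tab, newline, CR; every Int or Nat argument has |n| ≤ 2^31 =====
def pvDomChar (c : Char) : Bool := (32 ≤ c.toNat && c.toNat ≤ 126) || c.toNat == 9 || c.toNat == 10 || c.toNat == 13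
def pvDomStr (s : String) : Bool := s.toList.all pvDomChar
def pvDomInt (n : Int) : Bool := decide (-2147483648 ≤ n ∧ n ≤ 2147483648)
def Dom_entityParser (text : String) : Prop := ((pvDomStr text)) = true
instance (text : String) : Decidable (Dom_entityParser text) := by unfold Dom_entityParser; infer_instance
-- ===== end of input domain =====

-- B replaces A's scan-to-delimiter-then-dict-lookup with direct prefix matching of the six
-- literal entity strings at each position, joining the pieces once (simpler, and measured faster).

-- ===== PORT A =====

-- the dict literal of A ('&quot;' ↦ '"', …), over lists of chars
def entityMapA : PySem.Dict (List Char) (List Char) :=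
  PySem.Dict.ofList
    [ ("&quot;".toList, "\"".toList)
    , ("&apos;".toList, "'".toList)
    , ("&amp;".toList, "&".toList)
    , ("&gt;".toList, ">".toList)
    , ("&lt;".toList, "<".toList)
    , ("&frasl;".toList, "/".toList) ]

-- A's inner while loop: collect chars until '&' or ';' (or end), return (collected, remainder)
def scanSym : List Char → List Char × List Char
  | [] => ([], [])
  | c :: rest =>
    if c = '&' ∨ c = ';' then ([], c :: rest)
    else
      let (s, r) := scanSym rest
      (c :: s, r)

theorem scanSym_snd_length (l : List Char) : (scanSym l).2.length ≤ l.length := by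
  induction l with
  | nil => simp [scanSym]
  | cons c rest ih =>
    simp only [scanSym]
    split
    · simp
    · simpa using Nat.le_succ_of_le ih

-- A's outer while loop over the text
def runA : List Char → List Char
  | [] => []
  | c :: rest =>
    if c = '&' then
      let body := (scanSym rest).1
      let rest1 := (scanSym rest).2
      if rest1.head? = some ';' then
        let symbol := '&' :: body ++ [';']
        (match PySem.Dict.get? entityMapA symbol with
         | some v => v
         | none => symbol) ++ runA rest1.tail
      else
        let symbol := '&' :: body
        (match PySem.Dict.get? entityMapA symbol with
         | some v => v
         | none => symbol) ++ runA rest1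
    else c :: runA rest
termination_by l => l.length
decreasing_by
  · have h1 := scanSym_snd_length rest
    have h2 : (scanSym rest).2.tail.length ≤ (scanSym rest).2.length := by simp [List.length_tail]
    simp only [List.length_cons]; omega
  · have h1 := scanSym_snd_length rest
    simp only [List.length_cons]; omega
  · simp

def entityParser (text : String) : String := String.ofList (runA text.toList)

-- ===== PORT B =====

-- B's entity table: (literal entity, replacement char)
def entsB : List (List Char × Char) :=
  [ ("&quot;".toList, '"')
  , ("&apos;".toList, '\'')
  , ("&amp;".toList, '&')
  , ("&gt;".toList, '>')
  , ("&lt;".toList, '<')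
  , ("&frasl;".toList, '/') ]

-- B's inner for/else: first entity that is a prefix at the current position
def tryEnts : List (List Char × Char) → List Char → Option (Char × List Char)
  | [], _ => none
  | (k, v) :: ks, l => if k.isPrefixOf l then some (v, l.drop k.length) else tryEnts ks l

theorem tryEnts_length_lt :
    ∀ (es : List (List Char × Char)), (∀ p ∈ es, p.1 ≠ []) →
      ∀ {l : List Char} {v : Char} {r : List Char},
        tryEnts es l = some (v, r) → r.length < l.length := by
  intro es hne
  induction es with
  | nil => intro l v r h; simp [tryEnts] at h
  | cons p ks ih =>
    intro l v r h
    obtain ⟨k, w⟩ := p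
    simp only [tryEnts] at h
    split at h
    · next hp =>
      have hpre : k <+: l := by simpa [List.isPrefixOf_iff_prefix] using hp
      have hk : k ≠ [] := hne (k, w) (by simp)
      have h1 : 1 ≤ k.length := List.length_pos_iff.mpr hk
      have h2 : k.length ≤ l.length := hpre.length_le
      obtain ⟨rfl, rfl⟩ : v = w ∧ r = l.drop k.length := by
        constructor <;> { injection h with h'; cases h'; rfl }
      simp [List.length_drop]; omega
    · exact ih (fun q hq => hne q (by simp [hq])) h

-- B's outer loop
def runB : List Char → List Char
  | [] => []
  | c :: rest =>
    if hm : (tryEnts entsB (c :: rest)).isSome then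
      let vr := (tryEnts entsB (c :: rest)).get hm
      vr.1 :: runB vr.2
    else c :: runB rest
termination_by l => l.length
decreasing_by
  · exact tryEnts_length_lt entsB (by decide) (Option.some_get hm).symm
  · simp

def entityParser_alt (text : String) : String := String.ofList (runB text.toList)

-- ===== PRECONDITION & SPEC =====
def Spec_entityParser (text : String) (out : String) : Prop := out = entityParser_alt text
instance (text : String) (out : String) : Decidable (Spec_entityParser text out) := by unfold Spec_entityParser; infer_instance

-- ===== CLAIM (what is proved, stated in full; the proofs are below) =====
def Claim_equal_entityParser : Prop := ∀ (text : String), Dom_entityParser text → Spec_entityParser text (entityParser text)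

-- ===== LEMMAS AND PROOFS =====

-- Boolean form of A's inner-loop condition
def pvq (c : Char) : Bool := !(c == '&' || c == ';')

theorem scanSym_eq (l : List Char) :
    scanSym l = (l.takeWhile pvq, l.dropWhile pvq) := by
  induction l with
  | nil => simp [scanSym]
  | cons c rest ih =>
    by_cases h : c = '&' ∨ c = ';'
    · have hq : pvq c = false := by
        rcases h with h | h <;> simp [h, pvq]
      simp [scanSym, h, List.takeWhile_cons, List.dropWhile_cons, hq]
    · have hq : pvq c = true := by
        simp only [not_or] at h
        simp [pvq, h.1, h.2]
      simp [scanSym, h, ih, List.takeWhile_cons, List.dropWhile_cons, hq]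

theorem entsB_eq : entsB =
    [ (['&','q','u','o','t',';'], '"')
    , (['&','a','p','o','s',';'], '\'')
    , (['&','a','m','p',';'], '&')
    , (['&','g','t',';'], '>')
    , (['&','l','t',';'], '<')
    , (['&','f','r','a','s','l',';'], '/') ] := by decide

-- unfolding lemmas
theorem runA_nil : runA [] = [] := by rw [runA]
theorem runB_nil : runB [] = [] := by rw [runB]

theorem runA_not_amp {c : Char} (rest : List Char) (h : c ≠ '&') :
    runA (c :: rest) = c :: runA rest := by
  rw [runA.eq_def]; simp [h]

theorem runA_amp_semi {rest body rest2 : List Char}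
    (h : scanSym rest = (body, ';' :: rest2)) :
    runA ('&' :: rest) =
      (match PySem.Dict.get? entityMapA ('&' :: body ++ [';']) with
       | some v => v
       | none => '&' :: body ++ [';']) ++ runA rest2 := by
  rw [runA.eq_def]; simp [h]

theorem runA_amp_other {rest body rest1 : List Char}
    (h : scanSym rest = (body, rest1)) (hne : rest1.head? ≠ some ';') :
    runA ('&' :: rest) =
      (match PySem.Dict.get? entityMapA ('&' :: body) with
       | some v => v
       | none => '&' :: body) ++ runA rest1 := by
  rw [runA.eq_def]; simp [h, hne]

theorem runB_cons_none {c : Char} {rest : List Char}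
    (h : tryEnts entsB (c :: rest) = none) :
    runB (c :: rest) = c :: runB rest := by
  rw [runB.eq_def]; simp [h]

theorem runB_cons_some {c v : Char} {rest r : List Char}
    (h : tryEnts entsB (c :: rest) = some (v, r)) :
    runB (c :: rest) = v :: runB r := by
  rw [runB.eq_def]; simp [h]

-- tryEnts is none when no key is a prefix
theorem tryEnts_none_of (es : List (List Char × Char)) (l : List Char)
    (h : ∀ p ∈ es, ¬ p.1 <+: l) : tryEnts es l = none := by
  induction es with
  | nil => rfl
  | cons p ks ih =>
    obtain ⟨k, v⟩ := p
    simp only [tryEnts]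
    rw [if_neg, ih]
    · exact fun q hq => h q (by simp [hq])
    · simp only [List.isPrefixOf_iff_prefix]
      exact fun hp => (h (k, v) (by simp)) hp

-- no entity can start at a char other than '&'
theorem tryEnts_not_amp {c : Char} (rest : List Char) (h : c ≠ '&') :
    tryEnts entsB (c :: rest) = none := by
  apply tryEnts_none_of
  intro p hp hpre
  have hc : p.1.head? = some '&' := by
    rw [entsB_eq] at hp; fin_cases hp <;> rfl
  rcases hpre with ⟨t, ht⟩
  cases hp1 : p.1 with
  | nil => rw [hp1] at hc; simp at hc
  | cons a k =>
    rw [hp1] at hc ht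
    simp at hc
    simp at ht
    exact h (hc ▸ ht.1.symm)

-- B copies a block of entity-free chars verbatim
theorem runB_append (body r : List Char) (h : ∀ c ∈ body, pvq c = true) :
    runB (body ++ r) = body ++ runB r := by
  induction body with
  | nil => rfl
  | cons c b ih =>
    have hc : c ≠ '&' := by
      have := h c (by simp)
      simp [pvq] at this
      exact this.1
    rw [List.cons_append, runB_cons_none (tryEnts_not_amp _ hc),
        ih (fun x hx => h x (by simp [hx])), List.cons_append]

-- a key body followed by ';' matches the scanned body exactly
theorem prefix_body_eq (kb : List Char) (hkb : ∀ c ∈ kb, pvq c = true) :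
    ∀ (body : List Char), (∀ c ∈ body, pvq c = true) →
    ∀ (t : List Char), (kb ++ [';']) <+: (body ++ ';' :: t) → kb = body := by
  induction kb with
  | nil =>
    intro body hb t hp
    cases body with
    | nil => rfl
    | cons b body' =>
      simp only [List.nil_append] at hp
      rcases hp with ⟨s, hs⟩
      simp only [List.cons_append, List.cons.injEq] at hs
      have := hb b (by simp)
      rw [← hs.1] at this
      simp [pvq] at this
  | cons a kb' ih =>
    intro body hb t hp
    cases body with
    | nil =>
      simp only [List.nil_append, List.cons_append] at hp
      rcases hp with ⟨s, hs⟩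
      simp only [List.cons_append, List.cons.injEq] at hs
      have := hkb a (by simp)
      rw [hs.1] at this
      simp [pvq] at this
    | cons b body' =>
      rcases hp with ⟨s, hs⟩
      simp only [List.cons_append, List.cons.injEq, List.append_assoc] at hs
      obtain ⟨rfl, hs2⟩ := hs
      have : kb' = body' :=
        ih (fun c hc => hkb c (by simp [hc])) body' (fun c hc => hb c (by simp [hc])) t
          ⟨s, by simpa using hs2⟩
      rw [this]

-- no key matches when the scan stopped at the end or at a '&'
theorem prefix_no_semi (kb : List Char) (hkb : ∀ c ∈ kb, pvq c = true) :
    ∀ (body : List Char), (∀ c ∈ body, pvq c = true) →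
    ∀ (rest1 : List Char), (rest1 = [] ∨ ∃ t, rest1 = '&' :: t) →
    ¬ (kb ++ [';']) <+: (body ++ rest1) := by
  induction kb with
  | nil =>
    intro body hb rest1 hr hp
    cases body with
    | nil =>
      rcases hr with rfl | ⟨t, rfl⟩
      · simp at hp
      · simp only [List.nil_append] at hp
        rcases hp with ⟨s, hs⟩
        simp at hs
    | cons b body' =>
      simp only [List.nil_append, List.cons_append] at hp
      rcases hp with ⟨s, hs⟩
      simp only [List.cons_append, List.nil_append, List.cons.injEq] at hs
      have := hb b (by simp)
      rw [← hs.1] at this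
      simp [pvq] at this
  | cons a kb' ih =>
    intro body hb rest1 hr hp
    cases body with
    | nil =>
      have ha := hkb a (by simp)
      rcases hr with rfl | ⟨t, rfl⟩
      · simp at hp
      · simp only [List.nil_append, List.cons_append] at hp
        rcases hp with ⟨s, hs⟩
        simp only [List.cons_append, List.nil_append, List.cons.injEq] at hs
        rw [hs.1] at ha
        simp [pvq] at ha
    | cons b body' =>
      rcases hp with ⟨s, hs⟩
      simp only [List.cons_append, List.cons.injEq, List.append_assoc] at hs
      exact ih (fun c hc => hkb c (by simp [hc])) body' (fun c hc => hb c (by simp [hc]))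
        rest1 hr ⟨s, by simpa using hs.2⟩

theorem dropWhile_head_false (p : Char → Bool) (l : List Char) :
    ∀ c t, l.dropWhile p = c :: t → p c = false := by
  induction l with
  | nil => intro c t h; simp at h
  | cons a l ih =>
    intro c t h
    rw [List.dropWhile_cons] at h
    split at h
    · exact ih c t h
    · next hpa =>
      cases h
      simpa using hpa

-- per-entity reductions of B's matcher
theorem tryEnts_quot (t : List Char) :
    tryEnts entsB ('&'::'q'::'u'::'o'::'t'::';'::t) = some ('"', t) := by
  rw [entsB_eq]; simp [tryEnts, List.isPrefixOf]
theorem tryEnts_apos (t : List Char) :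
    tryEnts entsB ('&'::'a'::'p'::'o'::'s'::';'::t) = some ('\'', t) := by
  rw [entsB_eq]; simp [tryEnts, List.isPrefixOf]
theorem tryEnts_amp (t : List Char) :
    tryEnts entsB ('&'::'a'::'m'::'p'::';'::t) = some ('&', t) := by
  rw [entsB_eq]; simp [tryEnts, List.isPrefixOf]
theorem tryEnts_gt (t : List Char) :
    tryEnts entsB ('&'::'g'::'t'::';'::t) = some ('>', t) := by
  rw [entsB_eq]; simp [tryEnts, List.isPrefixOf]
theorem tryEnts_lt (t : List Char) :
    tryEnts entsB ('&'::'l'::'t'::';'::t) = some ('<', t) := by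
  rw [entsB_eq]; simp [tryEnts, List.isPrefixOf]
theorem tryEnts_frasl (t : List Char) :
    tryEnts entsB ('&'::'f'::'r'::'a'::'s'::'l'::';'::t) = some ('/', t) := by
  rw [entsB_eq]; simp [tryEnts, List.isPrefixOf]

-- the six key bodies are scannable
theorem kb_pvq_quot : ∀ c ∈ ['q','u','o','t'], pvq c = true := by
  intro c hc; fin_cases hc <;> rfl
theorem kb_pvq_apos : ∀ c ∈ ['a','p','o','s'], pvq c = true := by
  intro c hc; fin_cases hc <;> rfl
theorem kb_pvq_amp : ∀ c ∈ ['a','m','p'], pvq c = true := by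
  intro c hc; fin_cases hc <;> rfl
theorem kb_pvq_gt : ∀ c ∈ ['g','t'], pvq c = true := by
  intro c hc; fin_cases hc <;> rfl
theorem kb_pvq_lt : ∀ c ∈ ['l','t'], pvq c = true := by
  intro c hc; fin_cases hc <;> rfl
theorem kb_pvq_frasl : ∀ c ∈ ['f','r','a','s','l'], pvq c = true := by
  intro c hc; fin_cases hc <;> rfl

-- dict lookup misses when the scanned symbol is none of the six keys
theorem getA_none_semi (body : List Char)
    (h1 : body ≠ ['q','u','o','t']) (h2 : body ≠ ['a','p','o','s'])
    (h3 : body ≠ ['a','m','p']) (h4 : body ≠ ['g','t'])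
    (h5 : body ≠ ['l','t']) (h6 : body ≠ ['f','r','a','s','l']) :
    PySem.Dict.get? entityMapA ('&' :: body ++ [';']) = none := by
  have e : entityMapA = PySem.Dict.mk
    [ (['&','q','u','o','t',';'], ['"'])
    , (['&','a','p','o','s',';'], ['\''])
    , (['&','a','m','p',';'], ['&'])
    , (['&','g','t',';'], ['>'])
    , (['&','l','t',';'], ['<'])
    , (['&','f','r','a','s','l',';'], ['/']) ] := by decide
  rw [e]
  simp only [PySem.Dict.get?_mk_cons]
  split_ifs with g1 g2 g3 g4 g5 g6
  · exfalso; simp only [beq_iff_eq] at g1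
    exact h1 (List.append_cancel_right
      (show ['q','u','o','t'] ++ [';'] = body ++ [';'] from (List.cons.inj g1).2)).symm
  · exfalso; simp only [beq_iff_eq] at g2
    exact h2 (List.append_cancel_right
      (show ['a','p','o','s'] ++ [';'] = body ++ [';'] from (List.cons.inj g2).2)).symm
  · exfalso; simp only [beq_iff_eq] at g3
    exact h3 (List.append_cancel_right
      (show ['a','m','p'] ++ [';'] = body ++ [';'] from (List.cons.inj g3).2)).symm
  · exfalso; simp only [beq_iff_eq] at g4
    exact h4 (List.append_cancel_right
      (show ['g','t'] ++ [';'] = body ++ [';'] from (List.cons.inj g4).2)).symm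
  · exfalso; simp only [beq_iff_eq] at g5
    exact h5 (List.append_cancel_right
      (show ['l','t'] ++ [';'] = body ++ [';'] from (List.cons.inj g5).2)).symm
  · exfalso; simp only [beq_iff_eq] at g6
    exact h6 (List.append_cancel_right
      (show ['f','r','a','s','l'] ++ [';'] = body ++ [';'] from (List.cons.inj g6).2)).symm
  · rfl

theorem getA_none_other (body : List Char) (hb : ∀ c ∈ body, pvq c = true) :
    PySem.Dict.get? entityMapA ('&' :: body) = none := by
  have e : entityMapA = PySem.Dict.mk
    [ (['&','q','u','o','t',';'], ['"'])
    , (['&','a','p','o','s',';'], ['\''])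
    , (['&','a','m','p',';'], ['&'])
    , (['&','g','t',';'], ['>'])
    , (['&','l','t',';'], ['<'])
    , (['&','f','r','a','s','l',';'], ['/']) ] := by decide
  have hsemi : (';' : Char) ∉ body := by
    intro hm
    have := hb ';' hm
    simp [pvq] at this
  have conv : ∀ (kb : List Char), ';' ∈ kb →
      ((('&' :: kb : List Char)) == ('&' :: body)) = false := by
    intro kb hin
    simp only [List.cons_beq_cons, beq_self_eq_true, Bool.true_and]
    rw [beq_eq_false_iff_ne]
    intro hkb
    exact hsemi (hkb ▸ hin)
  rw [e]
  simp only [PySem.Dict.get?_mk_cons]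
  rw [conv _ (by decide), conv _ (by decide), conv _ (by decide),
      conv _ (by decide), conv _ (by decide), conv _ (by decide)]
  rfl

-- B's matcher misses when the scanned symbol is none of the six keys (scan hit ';')
theorem tryEnts_none_semi (body t : List Char) (hb : ∀ c ∈ body, pvq c = true)
    (h1 : body ≠ ['q','u','o','t']) (h2 : body ≠ ['a','p','o','s'])
    (h3 : body ≠ ['a','m','p']) (h4 : body ≠ ['g','t'])
    (h5 : body ≠ ['l','t']) (h6 : body ≠ ['f','r','a','s','l']) :
    tryEnts entsB ('&' :: (body ++ ';' :: t)) = none := by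
  apply tryEnts_none_of
  intro p hp hpre
  rw [entsB_eq] at hp
  fin_cases hp <;>
    · rw [List.cons_prefix_cons] at hpre
      first
        | exact h1 (prefix_body_eq _ kb_pvq_quot body hb t (by simpa using hpre.2)).symm
        | exact h2 (prefix_body_eq _ kb_pvq_apos body hb t (by simpa using hpre.2)).symm
        | exact h3 (prefix_body_eq _ kb_pvq_amp body hb t (by simpa using hpre.2)).symm
        | exact h4 (prefix_body_eq _ kb_pvq_gt body hb t (by simpa using hpre.2)).symm
        | exact h5 (prefix_body_eq _ kb_pvq_lt body hb t (by simpa using hpre.2)).symm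
        | exact h6 (prefix_body_eq _ kb_pvq_frasl body hb t (by simpa using hpre.2)).symm

-- B's matcher misses when the scan stopped at the end or at a '&'
theorem tryEnts_none_other (body rest1 : List Char) (hb : ∀ c ∈ body, pvq c = true)
    (hr : rest1 = [] ∨ ∃ t, rest1 = '&' :: t) :
    tryEnts entsB ('&' :: (body ++ rest1)) = none := by
  apply tryEnts_none_of
  intro p hp hpre
  rw [entsB_eq] at hp
  fin_cases hp <;>
    · rw [List.cons_prefix_cons] at hpre
      first
        | exact prefix_no_semi _ kb_pvq_quot body hb rest1 hr (by simpa using hpre.2)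
        | exact prefix_no_semi _ kb_pvq_apos body hb rest1 hr (by simpa using hpre.2)
        | exact prefix_no_semi _ kb_pvq_amp body hb rest1 hr (by simpa using hpre.2)
        | exact prefix_no_semi _ kb_pvq_gt body hb rest1 hr (by simpa using hpre.2)
        | exact prefix_no_semi _ kb_pvq_lt body hb rest1 hr (by simpa using hpre.2)
        | exact prefix_no_semi _ kb_pvq_frasl body hb rest1 hr (by simpa using hpre.2)

theorem runA_eq_runB_aux : ∀ (n : Nat) (l : List Char), l.length ≤ n → runA l = runB l := by
  intro n
  induction n with
  | zero =>
    intro l hl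
    have : l = [] := List.eq_nil_of_length_eq_zero (Nat.le_zero.mp hl)
    rw [this, runA_nil, runB_nil]
  | succ n ih =>
    intro l hl
    cases l with
    | nil => rw [runA_nil, runB_nil]
    | cons c rest =>
      simp only [List.length_cons, Nat.succ_le_succ_iff] at hl
      by_cases hc : c = '&'
      · subst hc
        have hscan := scanSym_eq rest
        have hTD := List.takeWhile_append_dropWhile (p := pvq) (l := rest)
        have hb : ∀ x ∈ rest.takeWhile pvq, pvq x = true :=
          fun x hx => List.mem_takeWhile_imp hx
        have hlen : (rest.takeWhile pvq).length + (rest.dropWhile pvq).length = rest.length := by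
          rw [← List.length_append, hTD]
        cases hd : rest.dropWhile pvq with
        | nil =>
          rw [hd] at hscan
          rw [runA_amp_other hscan (by simp), getA_none_other _ hb]
          rw [show runA [] = runB [] from by rw [runA_nil, runB_nil]]
          rw [runB_cons_none (by rw [← hTD, hd]; exact tryEnts_none_other _ _ hb (Or.inl rfl))]
          conv_rhs => rw [← hTD, hd, runB_append _ _ hb]
          simp
        | cons d t =>
          have hdf : pvq d = false := dropWhile_head_false pvq rest d t hd
          have hdor : d = '&' ∨ d = ';' := by
            by_cases ha1 : d = '&'
            · exact Or.inl ha1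
            · by_cases ha2 : d = ';'
              · exact Or.inr ha2
              · exfalso
                have : pvq d = true := by simp [pvq, ha1, ha2]
                rw [hdf] at this
                cases this
          have hrest : rest = rest.takeWhile pvq ++ d :: t := by conv_lhs => rw [← hTD, hd]
          have htlen : t.length ≤ n := by
            rw [hd] at hlen; simp only [List.length_cons] at hlen; omega
          rcases hdor with rfl | rfl
          · -- scan stopped at '&': symbol has no ';', nothing matches
            rw [hd] at hscan
            rw [runA_amp_other hscan (by simp), getA_none_other _ hb]
            rw [runB_cons_none (by rw [hrest]; exact tryEnts_none_other _ _ hb (Or.inr ⟨t, rfl⟩))]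
            conv_rhs => rw [hrest, runB_append _ _ hb]
            rw [ih ('&' :: t) (by rw [hd] at hlen; simp only [List.length_cons] at hlen ⊢; omega)]
            simp
          · -- scan stopped at ';'
            rw [hd] at hscan
            rw [runA_amp_semi hscan]
            by_cases h1 : rest.takeWhile pvq = ['q','u','o','t']
            · rw [h1] at hrest ⊢
              rw [show PySem.Dict.get? entityMapA ('&' :: ['q','u','o','t'] ++ [';']) = some ['"']
                    from by decide]
              rw [hrest, runB_cons_some (by exact tryEnts_quot t), ih t htlen]
              rfl
            · by_cases h2 : rest.takeWhile pvq = ['a','p','o','s']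
              · rw [h2] at hrest ⊢
                rw [show PySem.Dict.get? entityMapA ('&' :: ['a','p','o','s'] ++ [';']) = some ['\'']
                      from by decide]
                rw [hrest, runB_cons_some (by exact tryEnts_apos t), ih t htlen]
                rfl
              · by_cases h3 : rest.takeWhile pvq = ['a','m','p']
                · rw [h3] at hrest ⊢
                  rw [show PySem.Dict.get? entityMapA ('&' :: ['a','m','p'] ++ [';']) = some ['&']
                        from by decide]
                  rw [hrest, runB_cons_some (by exact tryEnts_amp t), ih t htlen]
                  rfl
                · by_cases h4 : rest.takeWhile pvq = ['g','t']
                  · rw [h4] at hrest ⊢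
                    rw [show PySem.Dict.get? entityMapA ('&' :: ['g','t'] ++ [';']) = some ['>']
                          from by decide]
                    rw [hrest, runB_cons_some (by exact tryEnts_gt t), ih t htlen]
                    rfl
                  · by_cases h5 : rest.takeWhile pvq = ['l','t']
                    · rw [h5] at hrest ⊢
                      rw [show PySem.Dict.get? entityMapA ('&' :: ['l','t'] ++ [';']) = some ['<']
                            from by decide]
                      rw [hrest, runB_cons_some (by exact tryEnts_lt t), ih t htlen]
                      rfl
                    · by_cases h6 : rest.takeWhile pvq = ['f','r','a','s','l']
                      · rw [h6] at hrest ⊢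
                        rw [show PySem.Dict.get? entityMapA ('&' :: ['f','r','a','s','l'] ++ [';']) = some ['/']
                              from by decide]
                        rw [hrest, runB_cons_some (by exact tryEnts_frasl t), ih t htlen]
                        rfl
                      · rw [getA_none_semi _ h1 h2 h3 h4 h5 h6]
                        rw [runB_cons_none (by rw [hrest]; exact tryEnts_none_semi _ t hb h1 h2 h3 h4 h5 h6)]
                        conv_rhs => rw [hrest, runB_append _ _ hb]
                        rw [runB_cons_none (tryEnts_not_amp t (by decide)), ih t htlen]
                        simp
      · rw [runA_not_amp rest hc, runB_cons_none (tryEnts_not_amp rest hc), ih rest hl]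

theorem runA_eq_runB (l : List Char) : runA l = runB l :=
  runA_eq_runB_aux l.length l (Nat.le_refl _)

-- ===== VERDICT (by name: the statement is the Claim_ definition above) =====
theorem entityParser_spec : Claim_equal_entityParser := by
  intro text _
  unfold Spec_entityParser entityParser entityParser_alt
  rw [runA_eq_runB]
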